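-- pv_equiv track=rewrite | github.com/akhandsingh17/assignments | codingexercise/MaxDistinctLowerCharbetUpperCase.py | MaxDistinctLowerCharbetUpperCase
-- ===== SOURCE A (Python) =====
-- def MaxDistinctLowerCharbetUpperCase(str1):
--
--     max_cnt=0
--     cnt=0
--     st=0
--     end=0
--     flg=False
--     tmp=[]
--     for i in range(0,len(str1)):
--
--         key=str1[i]
--
--         if key>='A' and key<='Z':
--             if flg==False:
--                 st=i
--                 flg=True
--             else:
--                 end=i
--                 if len(tmp)>max_cnt:
--                     max_cnt=len(tmp)
--                 tmp=[]
--                 st=i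
--         else:
--             if flg==True:
--                 if key not in tmp:
--                     tmp.append(key)
--
--     if cnt>max_cnt:
--         max_cnt=cnt
--     return max_cnt
-- ===== SOURCE B (Python) =====
-- def MaxDistinctLowerCharbetUpperCase(str1):
--     # Split the string on uppercase letters: each uppercase commits the pending
--     # run of non-uppercase characters as one segment.  Interior segments
--     # (between consecutive uppercase letters) are segs[1:]; the trailing run is
--     # never committed.  Answer = max distinct-char count over those segments.
--     segs = []
--     cur = []
--     for c in str1:
--         if 'A' <= c <= 'Z':
--             segs.append(cur)
--             cur = []
--         else:
--             cur.append(c)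
--     best = 0
--     for s in segs[1:]:
--         d = len(set(s))
--         if d > best:
--             best = d
--     return best
-- ===== Notes on version B (the rewrite author's own statement) =====
-- stated objective: simpler
-- what changed: A's single stateful scan (flag, running max, in-loop list-membership dedup) is replaced by a two-pass decomposition: split the string on uppercase letters into segments, then take the max of len(set(segment)) over the interior segments segs[1:].
import Mathlib
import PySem

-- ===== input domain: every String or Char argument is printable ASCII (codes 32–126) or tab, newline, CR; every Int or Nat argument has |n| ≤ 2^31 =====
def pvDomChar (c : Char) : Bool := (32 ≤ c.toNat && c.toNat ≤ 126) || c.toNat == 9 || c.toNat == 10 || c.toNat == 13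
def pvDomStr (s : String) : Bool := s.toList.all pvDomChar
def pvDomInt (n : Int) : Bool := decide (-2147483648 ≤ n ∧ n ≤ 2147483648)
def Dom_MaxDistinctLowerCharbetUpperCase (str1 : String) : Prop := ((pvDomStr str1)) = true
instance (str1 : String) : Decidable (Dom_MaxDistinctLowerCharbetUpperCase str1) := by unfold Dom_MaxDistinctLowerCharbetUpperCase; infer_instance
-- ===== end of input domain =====

-- B replaces A's single stateful flag-scan by a plain split-on-uppercase pass followed by a
-- max-of-distinct-counts pass over the interior segments (objective: simpler decomposition).

-- ===== PORT A =====
-- transliteration of A: one fold over the enumerated characters carrying the full Python state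
-- (max_cnt, cnt, st, end, flg, tmp); 'key not in tmp' is list membership as in the Python.
def MaxDistinctLowerCharbetUpperCase (str1 : String) : Int :=
  let r := (PySem.List.enumerate str1.toList).foldl
    (fun (s : Int × Int × Int × Int × Bool × List Char) (ic : Int × Char) =>
      let (max_cnt, cnt, st, en, flg, tmp) := s
      let i := ic.1
      let key := ic.2
      if 'A' ≤ key ∧ key ≤ 'Z' then
        if flg = false then (max_cnt, cnt, i, en, true, tmp)
        else
          let en := i
          let max_cnt := if (tmp.length : Int) > max_cnt then (tmp.length : Int) else max_cnt
          (max_cnt, cnt, i, en, true, ([] : List Char))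
      else
        if flg = true then
          (if key ∈ tmp then s else (max_cnt, cnt, st, en, flg, tmp ++ [key]))
        else s)
    ((0 : Int), (0 : Int), (0 : Int), (0 : Int), false, ([] : List Char))
  let max_cnt := r.1
  let cnt := r.2.1
  if cnt > max_cnt then cnt else max_cnt

-- ===== PORT B =====
-- transliteration of Source B: pass 1 splits on uppercase (segs, cur); pass 2 maxes len(set(s)) over segs[1:].
def MaxDistinctLowerCharbetUpperCase_alt (str1 : String) : Int :=
  let p := str1.toList.foldl
    (fun (acc : List (List Char) × List Char) (c : Char) =>
      let (segs, cur) := acc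
      if 'A' ≤ c ∧ c ≤ 'Z' then (segs ++ [cur], ([] : List Char))
      else (segs, cur ++ [c]))
    (([] : List (List Char)), ([] : List Char))
  let segs := p.1
  (segs.drop 1).foldl
    (fun (best : Int) (s : List Char) =>
      let d := ((PySem.Set.ofList s).length : Int)
      if d > best then d else best)
    0

-- ===== PRECONDITION & SPEC =====
def Spec_MaxDistinctLowerCharbetUpperCase (str1 : String) (out : Int) : Prop := out = MaxDistinctLowerCharbetUpperCase_alt str1
instance (str1 : String) (out : Int) : Decidable (Spec_MaxDistinctLowerCharbetUpperCase str1 out) := by unfold Spec_MaxDistinctLowerCharbetUpperCase; infer_instance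

-- ===== CLAIM (what is proved, stated in full; the proofs are below) =====
def Claim_equal_MaxDistinctLowerCharbetUpperCase : Prop := ∀ (str1 : String), Dom_MaxDistinctLowerCharbetUpperCase str1 → Spec_MaxDistinctLowerCharbetUpperCase str1 (MaxDistinctLowerCharbetUpperCase str1)

-- ===== LEMMAS AND PROOFS =====

-- abbreviations (proof-side only) for the two fold bodies
def pvStepA (s : Int × Int × Int × Int × Bool × List Char) (ic : Int × Char) :
    Int × Int × Int × Int × Bool × List Char :=
  let (max_cnt, cnt, st, en, flg, tmp) := s
  let i := ic.1
  let key := ic.2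
  if 'A' ≤ key ∧ key ≤ 'Z' then
    if flg = false then (max_cnt, cnt, i, en, true, tmp)
    else
      let en := i
      let max_cnt := if (tmp.length : Int) > max_cnt then (tmp.length : Int) else max_cnt
      (max_cnt, cnt, i, en, true, ([] : List Char))
  else
    if flg = true then
      (if key ∈ tmp then s else (max_cnt, cnt, st, en, flg, tmp ++ [key]))
    else s

def pvStepB (acc : List (List Char) × List Char) (c : Char) : List (List Char) × List Char :=
  let (segs, cur) := acc
  if 'A' ≤ c ∧ c ≤ 'Z' then (segs ++ [cur], ([] : List Char))
  else (segs, cur ++ [c])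

def pvMaxStep (best : Int) (s : List Char) : Int :=
  let d := ((PySem.Set.ofList s).length : Int)
  if d > best then d else best

theorem pvMaxStep_ge (best : Int) (s : List Char) : best ≤ pvMaxStep best s := by
  unfold pvMaxStep; dsimp only; split <;> omega

theorem pvMaxFold_nonneg (l : List (List Char)) (m : Int) (hm : 0 ≤ m) :
    0 ≤ l.foldl pvMaxStep m := by
  induction l generalizing m with
  | nil => exact hm
  | cons s l ih => exact ih _ (le_trans hm (pvMaxStep_ge m s))

-- B's split fold only appends to segs
theorem pvSplit_append (l : List Char) (segs : List (List Char)) (cur : List Char) :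
    l.foldl pvStepB (segs, cur) =
      (segs ++ (l.foldl pvStepB ([], cur)).1, (l.foldl pvStepB ([], cur)).2) := by
  induction l generalizing segs cur with
  | nil => simp
  | cons c l ih =>
    simp only [List.foldl_cons]
    by_cases h : 'A' ≤ c ∧ c ≤ 'Z'
    · rw [show pvStepB (segs, cur) c = (segs ++ [cur], []) by simp [pvStepB, h],
        show pvStepB (([] : List (List Char)), cur) c = ([cur], []) by simp [pvStepB, h],
        ih (segs ++ [cur]) [], ih [cur] []]
      simp
    · rw [show pvStepB (segs, cur) c = (segs, cur ++ [c]) by simp [pvStepB, h],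
        show pvStepB (([] : List (List Char)), cur) c = ([], cur ++ [c]) by simp [pvStepB, h]]
      exact ih segs (cur ++ [c])

-- phase flg = true: A's running max over commits = B's max fold over the segments still to be committed,
-- where A's tmp is the ordered dedup (PySem.Set.ofList) of B's pending raw segment cur.
theorem pvPhaseTrue (l : List (Int × Char)) (cur : List Char) (m cnt st en : Int) :
    (l.foldl pvStepA (m, cnt, st, en, true, PySem.Set.ofList cur)).1 =
      ((l.map Prod.snd).foldl pvStepB ([], cur)).1.foldl pvMaxStep m := by
  induction l generalizing cur m st en with
  | nil => simp
  | cons ic l ih =>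
    obtain ⟨i, c⟩ := ic
    simp only [List.foldl_cons, List.map_cons]
    by_cases h : 'A' ≤ c ∧ c ≤ 'Z'
    · rw [show pvStepA (m, cnt, st, en, true, PySem.Set.ofList cur) (i, c)
          = (if ((PySem.Set.ofList cur).length : Int) > m then ((PySem.Set.ofList cur).length : Int) else m,
             cnt, i, i, true, ([] : List Char)) by simp [pvStepA, h],
        show pvStepB (([] : List (List Char)), cur) c = ([cur], []) by simp [pvStepB, h]]
      have := ih ([] : List Char)
        (if ((PySem.Set.ofList cur).length : Int) > m then ((PySem.Set.ofList cur).length : Int) else m)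
      rw [show (PySem.Set.ofList ([] : List Char)) = [] from rfl] at this
      rw [this i i, pvSplit_append (l.map Prod.snd) [cur] []]
      simp [pvMaxStep]
    · rw [show pvStepB (([] : List (List Char)), cur) c = ([], cur ++ [c]) by simp [pvStepB, h]]
      have hstep : pvStepA (m, cnt, st, en, true, PySem.Set.ofList cur) (i, c)
          = (m, cnt, st, en, true, PySem.Set.ofList (cur ++ [c])) := by
        simp only [pvStepA, h, if_false]
        have : PySem.Set.ofList (cur ++ [c]) = PySem.Set.add (PySem.Set.ofList cur) c := by
          simp [PySem.Set.ofList_eq_foldl]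
        by_cases hc : c ∈ PySem.Set.ofList cur
        · simp [this, PySem.Set.add, PySem.Set.contains, hc]
        · simp [this, PySem.Set.add, PySem.Set.contains, hc]
      rw [hstep, ih (cur ++ [c]) m]

-- phase flg = false: the prefix before the first uppercase becomes B's segs[0], which is dropped.
theorem pvPhaseFalse (l : List (Int × Char)) (cur : List Char) (m cnt st en : Int) :
    (l.foldl pvStepA (m, cnt, st, en, false, [])).1 =
      (((l.map Prod.snd).foldl pvStepB ([], cur)).1.drop 1).foldl pvMaxStep m := by
  induction l generalizing cur st en with
  | nil => simp
  | cons ic l ih =>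
    obtain ⟨i, c⟩ := ic
    simp only [List.foldl_cons, List.map_cons]
    by_cases h : 'A' ≤ c ∧ c ≤ 'Z'
    · rw [show pvStepA (m, cnt, st, en, false, ([] : List Char)) (i, c)
          = (m, cnt, i, en, true, ([] : List Char)) by simp [pvStepA, h],
        show pvStepB (([] : List (List Char)), cur) c = ([cur], []) by simp [pvStepB, h],
        pvSplit_append (l.map Prod.snd) [cur] []]
      have h0 := pvPhaseTrue l ([] : List Char) m cnt i en
      rw [show (PySem.Set.ofList ([] : List Char)) = [] from rfl] at h0
      simp only [h0]
      simp
    · rw [show pvStepA (m, cnt, st, en, false, ([] : List Char)) (i, c)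
          = (m, cnt, st, en, false, ([] : List Char)) by simp [pvStepA, h],
        show pvStepB (([] : List (List Char)), cur) c = ([], cur ++ [c]) by simp [pvStepB, h]]
      exact ih (cur ++ [c]) st en

-- cnt is never modified by A's loop
theorem pvCnt_const (l : List (Int × Char)) (s : Int × Int × Int × Int × Bool × List Char) :
    (l.foldl pvStepA s).2.1 = s.2.1 := by
  induction l generalizing s with
  | nil => rfl
  | cons ic l ih =>
    rw [List.foldl_cons, ih]
    obtain ⟨m, cnt, st, en, flg, tmp⟩ := s
    unfold pvStepA
    dsimp only
    split <;> split <;> (try split) <;> rfl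

-- ===== VERDICT (by name: the statement is the Claim_ definition above) =====
theorem MaxDistinctLowerCharbetUpperCase_spec : Claim_equal_MaxDistinctLowerCharbetUpperCase := by
  intro str1 _
  unfold Spec_MaxDistinctLowerCharbetUpperCase MaxDistinctLowerCharbetUpperCase MaxDistinctLowerCharbetUpperCase_alt
  rw [show (fun (s : Int × Int × Int × Int × Bool × List Char) (ic : Int × Char) =>
      let (max_cnt, cnt, st, en, flg, tmp) := s
      let i := ic.1
      let key := ic.2
      if 'A' ≤ key ∧ key ≤ 'Z' then
        if flg = false then (max_cnt, cnt, i, en, true, tmp)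
        else
          let en := i
          let max_cnt := if (tmp.length : Int) > max_cnt then (tmp.length : Int) else max_cnt
          (max_cnt, cnt, i, en, true, ([] : List Char))
      else
        if flg = true then
          (if key ∈ tmp then s else (max_cnt, cnt, st, en, flg, tmp ++ [key]))
        else s) = pvStepA from rfl]
  rw [show (fun (acc : List (List Char) × List Char) (c : Char) =>
      let (segs, cur) := acc
      if 'A' ≤ c ∧ c ≤ 'Z' then (segs ++ [cur], ([] : List Char))
      else (segs, cur ++ [c])) = pvStepB from rfl]
  rw [show (fun (best : Int) (s : List Char) =>
      let d := ((PySem.Set.ofList s).length : Int)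
      if d > best then d else best) = pvMaxStep from rfl]
  have hmap : (PySem.List.enumerate str1.toList).map Prod.snd = str1.toList := by
    simp [PySem.List.map_snd_enumerate]
  have hmain := pvPhaseFalse (PySem.List.enumerate str1.toList) ([] : List Char) 0 0 0 0
  rw [hmap] at hmain
  have hcnt := pvCnt_const (PySem.List.enumerate str1.toList) (0, 0, 0, 0, false, ([] : List Char))
  have hcnt0 : ((PySem.List.enumerate str1.toList).foldl pvStepA
      (0, 0, 0, 0, false, ([] : List Char))).2.1 = (0 : Int) := hcnt
  have hnn : 0 ≤ ((str1.toList.foldl pvStepB ([], [])).1.drop 1).foldl pvMaxStep 0 :=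
    pvMaxFold_nonneg _ 0 le_rfl
  dsimp only
  rw [hcnt0, hmain]
  split
  · omega
  · rfl
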